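-- pv_equiv track=rewrite | github.com/dudekkatarzyna/Choosing-Technological-Proces | cta/resource_configurations_manager.py | _has_more_configs
-- ===== SOURCE A (Python) =====
-- from typing import List
--
-- def _has_more_configs(x: List[int]) -> bool:
--     copy_x = x[:]
--     last = copy_x.pop()
--     if last == 0:
--         return True
--
--     x_sum = 0
--
--     for val in copy_x:
--         x_sum += val
--         if x_sum:
--             return True
--
--     return False
-- ===== SOURCE B (Python) =====
-- from typing import List
--
-- def _has_more_configs(x: List[int]) -> bool:
--     # unpack (raises on empty, like the original pop); aggregate reduction:
--     # some prefix sum of init is nonzero  iff  some element is nonzero  iff  sum of |v| > 0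
--     *init, last = x
--     return last == 0 or sum(map(abs, init)) > 0
-- ===== Notes on version B (the rewrite author's own statement) =====
-- stated objective: alternative
-- what changed: Replaces A's short-circuit prefix-sum scan with a branch-free aggregate reduction: unpack the last element and test sum(map(abs, init)) > 0, using that some prefix sum is nonzero iff the sum of absolute values is positive.
import Mathlib
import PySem

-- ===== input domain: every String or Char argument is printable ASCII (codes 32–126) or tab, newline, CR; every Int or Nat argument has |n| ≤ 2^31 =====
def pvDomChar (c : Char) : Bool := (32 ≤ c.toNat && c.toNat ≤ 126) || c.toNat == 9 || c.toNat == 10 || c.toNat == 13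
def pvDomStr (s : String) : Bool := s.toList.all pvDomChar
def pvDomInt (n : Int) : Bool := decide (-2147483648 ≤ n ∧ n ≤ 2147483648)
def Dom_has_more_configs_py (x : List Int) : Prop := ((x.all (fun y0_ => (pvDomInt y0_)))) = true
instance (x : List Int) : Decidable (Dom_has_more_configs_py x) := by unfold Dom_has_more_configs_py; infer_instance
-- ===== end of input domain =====

-- B replaces A's short-circuit prefix-sum scan with an aggregate reduction
-- (last == 0 or sum of |v| over x[:-1] > 0); return values agree on all nonempty
-- lists (both raise on []).

-- ===== PORT A =====
-- A's for-loop with running accumulator x_sum and early return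
def hmcLoopA (x_sum : Int) : List Int → Bool
  | [] => false
  | val :: rest =>
      let x_sum := x_sum + val
      if x_sum ≠ 0 then true else hmcLoopA x_sum rest

def has_more_configs_py (x : List Int) : Bool :=
  -- copy_x = x[:]; last = copy_x.pop()  (raises IndexError on []; excluded by Pre_)
  match x.getLast? with
  | none => false
  | some last =>
      if last = 0 then true
      else hmcLoopA 0 x.dropLast

-- ===== PORT B =====
def has_more_configs_py_alt (x : List Int) : Bool :=
  -- *init, last = x  (raises ValueError on []; excluded by Pre_)
  match x.getLast? with
  | none => false
  | some last =>
      last == 0 || decide (0 < (x.dropLast.map (fun v => |v|)).sum)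

-- ===== PRECONDITION & SPEC =====
-- Pre_ excludes the empty list, on which both A and B raise.
def Pre_has_more_configs_py (x : List Int) : Prop := x ≠ []
instance (x : List Int) : Decidable (Pre_has_more_configs_py x) := by unfold Pre_has_more_configs_py; infer_instance
def pvWitness_has_more_configs_py : List Int := [1, 0, -2]

def Spec_has_more_configs_py (x : List Int) (out : Bool) : Prop := out = has_more_configs_py_alt x
instance (x : List Int) (out : Bool) : Decidable (Spec_has_more_configs_py x out) := by unfold Spec_has_more_configs_py; infer_instance

-- ===== CLAIM (what is proved, stated in full; the proofs are below) =====
def Claim_equal_has_more_configs_py : Prop := ∀ (x : List Int), Dom_has_more_configs_py x → Pre_has_more_configs_py x → Spec_has_more_configs_py x (has_more_configs_py x)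

-- ===== LEMMAS AND PROOFS =====
-- A's loop started at 0 returns true iff the sum of absolute values is positive
theorem hmcLoopA_zero (l : List Int) :
    hmcLoopA 0 l = decide (0 < (l.map (fun v => |v|)).sum) := by
  induction l with
  | nil => rfl
  | cons v t ih =>
      have ht : 0 ≤ (t.map (fun v => |v|)).sum :=
        List.sum_nonneg (by intro a ha; simp at ha; obtain ⟨b, _, hb⟩ := ha; simp [← hb])
      by_cases hv : v = 0
      · subst hv; simpa [hmcLoopA] using ih
      · have : |v| > 0 := abs_pos.mpr hv
        simp only [hmcLoopA, List.map_cons, List.sum_cons]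
        rw [if_pos (by simpa using hv)]
        have : (0 : Int) < |v| + (t.map (fun v => |v|)).sum := by omega
        simp [this]

-- ===== VERDICT (by name: the statement is the Claim_ definition above) =====
theorem has_more_configs_py_spec : Claim_equal_has_more_configs_py := by
  intro x _ hx
  unfold Spec_has_more_configs_py has_more_configs_py has_more_configs_py_alt
  obtain ⟨last, h⟩ := Option.ne_none_iff_exists'.mp (mt List.getLast?_eq_none_iff.mp hx)
  rw [h]
  by_cases hl : last = 0
  · simp [hl]
  · simp [hl, hmcLoopA_zero]
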